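-- pv_equiv track=rewrite | github.com/VinayakWankhade/Ai_Powered_Api_Testing_system | src/defects/defect_clustering.py | _minimize_headers
-- ===== SOURCE A (Python) =====
-- from typing import Dict, List, Any, Optional, Tuple, Set
--
-- def _minimize_headers(headers: Dict[str, Any]) -> Dict[str, Any]:
--     """Keep only essential headers for reproduction."""
--
--     essential_headers = {}
--
--     # Always keep content-type and authorization
--     for key in ["Content-Type", "Authorization", "Accept"]:
--         if key in headers:
--             essential_headers[key] = headers[key]
--         # Check case-insensitive
--         for header_key, header_value in headers.items():
--             if header_key.lower() == key.lower():
--                 essential_headers[key] = header_value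
--                 break
--
--     return essential_headers
-- ===== SOURCE B (Python) =====
-- def _minimize_headers(headers):
--     """Keep only essential headers for reproduction."""
--     # Loop interchange: ONE pass over the headers themselves. Each header is
--     # classified against a precomputed lowercase -> canonical-name map; the
--     # first header matching each canonical key wins. Results are then emitted
--     # in canonical order.
--     canonical = {k.lower(): k for k in ["Content-Type", "Authorization", "Accept"]}
--     found = {}
--     for header_key, header_value in headers.items():
--         key = canonical.get(header_key.lower())
--         if key is not None and key not in found:
--             found[key] = header_value
--     return {key: found[key] for key in ["Content-Type", "Authorization", "Accept"] if key in found}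
-- ===== Notes on version B (the rewrite author's own statement) =====
-- stated objective: alternative
-- what changed: Inverts the loop nesting: instead of scanning all headers once per essential key (three scans, each with a redundant exact-match pre-step), B makes a single pass over the headers, classifying each header via a precomputed lowercase-to-canonical map and keeping the first match per canonical key, then emits the found entries in canonical order.
import Mathlib
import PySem

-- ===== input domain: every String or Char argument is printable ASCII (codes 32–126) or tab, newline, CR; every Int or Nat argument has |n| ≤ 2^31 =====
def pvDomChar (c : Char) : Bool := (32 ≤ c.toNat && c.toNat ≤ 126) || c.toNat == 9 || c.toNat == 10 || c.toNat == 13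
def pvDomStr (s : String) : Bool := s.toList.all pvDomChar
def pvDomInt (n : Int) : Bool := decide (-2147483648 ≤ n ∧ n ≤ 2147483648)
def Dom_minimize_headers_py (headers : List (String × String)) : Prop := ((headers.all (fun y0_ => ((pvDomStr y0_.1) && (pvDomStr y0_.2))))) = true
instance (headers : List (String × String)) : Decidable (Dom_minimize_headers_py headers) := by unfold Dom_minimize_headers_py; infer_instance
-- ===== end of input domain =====

-- B inverts the loop nesting: one pass over the headers classifying each against a precomputed
-- lowercase->canonical map (first match per key wins), then emits the found keys in canonical order.


-- ===== PORT A =====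
-- inner 'for header_key, header_value in headers.items(): if …: ess[key] = header_value; break'
def mhAInner (key : String) (items : List (String × String)) (ess : PySem.Dict String String) : PySem.Dict String String :=
  match items with
  | [] => ess
  | (hk, hv) :: rest =>
    if PySem.Str.lower hk == PySem.Str.lower key then ess.insert key hv
    else mhAInner key rest ess

def minimize_headers_py (headers : List (String × String)) : List (String × String) :=
  let d : PySem.Dict String String := PySem.Dict.mk headers
  let ess := ["Content-Type", "Authorization", "Accept"].foldl (fun ess key =>
    let ess := match d.get? key with        -- 'if key in headers: ess[key] = headers[key]'
      | some v => ess.insert key v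
      | none => ess
    mhAInner key d.items ess) PySem.Dict.empty
  ess.items

-- ===== PORT B =====
-- 'canonical = {k.lower(): k for k in [...]}'
def mhCanonical : PySem.Dict String String :=
  ["Content-Type", "Authorization", "Accept"].foldl
    (fun m k => m.insert (PySem.Str.lower k) k) PySem.Dict.empty

def minimize_headers_py_alt (headers : List (String × String)) : List (String × String) :=
  -- one pass over the headers: first match per canonical key wins
  let found := headers.foldl (fun f p =>
    match mhCanonical.get? (PySem.Str.lower p.1) with
    | some key => if f.contains key then f else f.insert key p.2
    | none => f) (PySem.Dict.empty : PySem.Dict String String)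
  -- '{key: found[key] for key in [...] if key in found}'
  (["Content-Type", "Authorization", "Accept"].foldl (fun r key =>
    match found.get? key with
    | some v => r.insert key v
    | none => r) (PySem.Dict.empty : PySem.Dict String String)).items

-- ===== PRECONDITION & SPEC =====
def Spec_minimize_headers_py (headers : List (String × String)) (out : List (String × String)) : Prop := out = minimize_headers_py_alt headers
instance (headers : List (String × String)) (out : List (String × String)) : Decidable (Spec_minimize_headers_py headers out) := by unfold Spec_minimize_headers_py; infer_instance

-- ===== CLAIM (what is proved, stated in full; the proofs are below) =====
def Claim_equal_minimize_headers_py : Prop := ∀ (headers : List (String × String)), Dom_minimize_headers_py headers → Spec_minimize_headers_py headers (minimize_headers_py headers)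

-- ===== LEMMAS AND PROOFS =====

-- A's inner scan is the first case-insensitive match
theorem mh_inner_eq (key : String) (items : List (String × String)) (ess : PySem.Dict String String) :
    mhAInner key items ess =
      match items.find? (fun p => PySem.Str.lower p.1 == PySem.Str.lower key) with
      | some p => ess.insert key p.2
      | none => ess := by
  induction items with
  | nil => rfl
  | cons p rest ih =>
    obtain ⟨hk, hv⟩ := p
    simp only [mhAInner, List.find?_cons]
    by_cases he : PySem.Str.lower hk == PySem.Str.lower key
    · simp [he]
    · simp [he, ih]

-- no case-insensitive match ⇒ no exact match
theorem mh_find_none_get_none (headers : List (String × String)) (key : String)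
    (h : headers.find? (fun p => PySem.Str.lower p.1 == PySem.Str.lower key) = none) :
    (PySem.Dict.mk headers).get? key = none := by
  induction headers with
  | nil => rfl
  | cons p rest ih =>
    obtain ⟨hk, hv⟩ := p
    simp only [List.find?_cons] at h
    rw [PySem.Dict.get?_mk_cons]
    by_cases he : PySem.Str.lower hk == PySem.Str.lower key
    · simp [he] at h
    · have hne : (hk == key) = false := by
        rcases Bool.eq_false_or_eq_true (hk == key) with hb | hb
        · have : hk = key := by simpa using hb
          subst this; simp at he
        · exact hb
      simp only [he] at h
      simp [hne, ih h]

-- B's canonical map, as a lookup table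
theorem mh_canon_get (s : String) : mhCanonical.get? s =
    if "content-type" == s then some "Content-Type"
    else if "authorization" == s then some "Authorization"
    else if "accept" == s then some "Accept" else none := by
  have h : mhCanonical = PySem.Dict.mk
      [("content-type", "Content-Type"), ("authorization", "Authorization"), ("accept", "Accept")] := by
    decide
  rw [h]
  simp only [PySem.Dict.get?_mk_cons]
  rfl

-- B's single pass: the value recorded for key c is the first header the canonical map sends to c
theorem mhB_get (headers : List (String × String)) (f : PySem.Dict String String) (c : String) :
    (headers.foldl (fun f p =>
      match mhCanonical.get? (PySem.Str.lower p.1) with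
      | some key => if f.contains key then f else f.insert key p.2
      | none => f) f).get? c =
    (f.get? c).or ((headers.find? (fun p => mhCanonical.get? (PySem.Str.lower p.1) == some c)).map (·.2)) := by
  induction headers generalizing f with
  | nil => simp
  | cons p rest ih =>
    simp only [List.foldl_cons, List.find?_cons]
    cases hcg : mhCanonical.get? (PySem.Str.lower p.1) with
    | none => simp [hcg, ih]
    | some key =>
      by_cases hkc : key = c
      · subst hkc
        by_cases hc : f.contains key = true
        · have hsome : (f.get? key).isSome := by
            rw [← PySem.Dict.contains_eq_isSome_get?]; exact hc
          simp only [hc, if_true, ih]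
          cases hg : f.get? key with
          | none => rw [hg] at hsome; simp at hsome
          | some v => simp [hg]
        · have hg : f.get? key = none := by
            cases hx : f.get? key with
            | none => rfl
            | some v =>
              have := PySem.Dict.contains_eq_isSome_get? (d := f) (k := key)
              rw [hx] at this; rw [this] at hc; simp at hc
          simp [hc, ih, hg, PySem.Dict.get?_insert_self]
      · have hkf : (key == c) = false := beq_eq_false_iff_ne.mpr hkc
        by_cases hc : f.contains key = true
        · simp [hc, ih, hkf]
        · simp [hc, ih, hkf, PySem.Dict.get?_insert_of_ne _ _ (Ne.symm hkc)]

-- the canonical map sends s to c exactly when s is c's lowercasing, for each essential c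
theorem mh_canon_beq (s c : String)
    (hc : c = "Content-Type" ∨ c = "Authorization" ∨ c = "Accept") :
    (mhCanonical.get? s == some c) = (s == PySem.Str.lower c) := by
  rw [mh_canon_get]
  rcases hc with h | h | h <;> subst h <;>
    by_cases h1 : ("content-type" == s) = true <;>
    by_cases h2 : ("authorization" == s) = true <;>
    by_cases h3 : ("accept" == s) = true <;>
    simp_all [beq_iff_eq, show PySem.Str.lower "Content-Type" = "content-type" from by decide,
      show PySem.Str.lower "Authorization" = "authorization" from by decide,
      show PySem.Str.lower "Accept" = "accept" from by decide] <;>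
    (try intro h) <;> subst s <;> simp_all

-- ===== VERDICT (by name: the statement is the Claim_ definition above) =====
theorem minimize_headers_py_spec : Claim_equal_minimize_headers_py := by
  intro headers _
  show minimize_headers_py headers = minimize_headers_py_alt headers
  simp only [minimize_headers_py, minimize_headers_py_alt]
  -- A's per-key step is 'insert the first case-insensitive match, if any'
  have hstepA : ∀ (ess : PySem.Dict String String) (key : String),
      (mhAInner key (PySem.Dict.mk headers).items
        (match (PySem.Dict.mk headers).get? key with
         | some v => ess.insert key v
         | none => ess)) =
      (match (headers.find? (fun p => PySem.Str.lower p.1 == PySem.Str.lower key)).map (·.2) with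
       | some v => ess.insert key v
       | none => ess) := by
    intro ess key
    rw [mh_inner_eq]
    have hitems : (PySem.Dict.mk headers).items = headers := rfl
    rw [hitems]
    cases hf : headers.find? (fun p => PySem.Str.lower p.1 == PySem.Str.lower key) with
    | none =>
      rw [mh_find_none_get_none headers key hf]
      simp
    | some q =>
      cases hg : (PySem.Dict.mk headers).get? key with
      | none => simp
      | some v => simp [PySem.Dict.insert_insert_self]
  -- B's found-lookup at each essential key is the same first match
  have hB : ∀ (c : String), c = "Content-Type" ∨ c = "Authorization" ∨ c = "Accept" →
      (headers.foldl (fun f p =>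
        match mhCanonical.get? (PySem.Str.lower p.1) with
        | some key => if f.contains key then f else f.insert key p.2
        | none => f) (PySem.Dict.empty : PySem.Dict String String)).get? c =
      (headers.find? (fun p => PySem.Str.lower p.1 == PySem.Str.lower c)).map (·.2) := by
    intro c hc
    rw [mhB_get,
      show (fun (p : String × String) => mhCanonical.get? (PySem.Str.lower p.1) == some c) =
        (fun p => PySem.Str.lower p.1 == PySem.Str.lower c) from
        funext fun p => mh_canon_beq _ c hc]
    simp
  simp only [List.foldl_cons, List.foldl_nil, hstepA,
    hB "Content-Type" (Or.inl rfl), hB "Authorization" (Or.inr (Or.inl rfl)),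
    hB "Accept" (Or.inr (Or.inr rfl))]
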